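-- pv_equiv track=rewrite | github.com/monizyzz/University | 2-year/Algorithmic Laboratory II/Graph_algorithms/erdos.py | build
-- ===== SOURCE A (Python) =====
-- def build(adj, artigos):
--     grafo = adj
--
--     for a in adj:
--         for auths in artigos.values():
--             for auth in auths:
--                 if a in auths and a != auth:
--                     grafo[a].add(auth)
--
--     return grafo
-- ===== SOURCE B (Python) =====
-- def build(adj, artigos):
--     grafo = adj
--     for auths in artigos.values():
--         for a in dict.fromkeys(auths):
--             if a in grafo:
--                 s = grafo[a]
--                 for auth in auths:
--                     if auth != a:
--                         s.add(auth)
--     return grafo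
-- ===== Notes on version B (the rewrite author's own statement) =====
-- stated objective: faster
-- what changed: B makes a single pass over the articles, adding each article's co-authors to the adjacency sets of that article's authors directly, instead of A's outer loop over every graph vertex that rescans every article with a quadratic membership test; equivalence is about the return value (both mutate adj in place identically).
import Mathlib
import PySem

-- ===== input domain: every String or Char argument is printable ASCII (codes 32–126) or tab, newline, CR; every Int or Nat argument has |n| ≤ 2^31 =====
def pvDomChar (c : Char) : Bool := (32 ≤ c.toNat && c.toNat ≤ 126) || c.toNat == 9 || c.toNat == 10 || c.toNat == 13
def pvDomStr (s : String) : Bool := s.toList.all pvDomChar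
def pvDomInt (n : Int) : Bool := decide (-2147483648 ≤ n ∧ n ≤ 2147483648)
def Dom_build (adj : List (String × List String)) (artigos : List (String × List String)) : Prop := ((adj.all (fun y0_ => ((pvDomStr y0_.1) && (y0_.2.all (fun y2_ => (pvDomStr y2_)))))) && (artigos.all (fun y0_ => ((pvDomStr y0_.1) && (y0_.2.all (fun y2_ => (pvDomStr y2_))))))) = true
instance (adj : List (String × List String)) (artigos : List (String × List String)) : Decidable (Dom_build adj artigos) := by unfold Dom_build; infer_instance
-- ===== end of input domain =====

-- B replaces A's per-vertex rescan of every article (with a quadratic membership test inside) by a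
-- single pass over the articles that updates each article's authors directly (faster). Both Pythons
-- mutate adj in place in the same way; the equivalence proved here is about the return value.

-- ===== PORT A =====
-- `grafo[a].add(auth)`: in-place update of the set stored under key a of the dict grafo; a is
-- always a key of grafo here (it comes from iterating adj), so no KeyError arises. Exact for a
-- valid dict encoding (Pre_build: unique keys): the unique entry of key a is updated in place.
def modifyFirst (g : List (String × List String)) (a : String) (f : List String → List String) : List (String × List String) :=
  match g with
  | [] => []
  | (k, s) :: rest => if k = a then (k, f s) :: rest else (k, s) :: modifyFirst rest a f

-- grafo = adj; for a in adj: for auths in artigos.values(): for auth in auths: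
--   if a in auths and a != auth: grafo[a].add(auth)
def build (adj : List (String × List String)) (artigos : List (String × List String)) : List (String × List String) :=
  (adj.map Prod.fst).foldl (fun grafo a =>
    (artigos.map Prod.snd).foldl (fun g auths =>
      auths.foldl (fun g2 auth =>
        if a ∈ auths ∧ a ≠ auth then modifyFirst g2 a (fun s => PySem.Set.add s auth) else g2) g) grafo) adj

-- ===== PORT B =====
-- `a in grafo`: dict membership test.
def containsKey (g : List (String × List String)) (a : String) : Bool :=
  g.any (fun p => p.1 == a)

-- grafo = adj; for auths in artigos.values(): for a in dict.fromkeys(auths):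
--   if a in grafo: s = grafo[a]; for auth in auths: if auth != a: s.add(auth)
def build_alt (adj : List (String × List String)) (artigos : List (String × List String)) : List (String × List String) :=
  (artigos.map Prod.snd).foldl (fun grafo auths =>
    (PySem.List.dedup auths).foldl (fun g a =>
      if containsKey g a then
        modifyFirst g a (fun s =>
          auths.foldl (fun s' auth => if auth ≠ a then PySem.Set.add s' auth else s') s)
      else g) grafo) adj

-- ===== PRECONDITION & SPEC =====
-- Pre_ excludes only association lists with duplicate keys, which are not the encoding of any
-- Python input: a Python dict cannot have duplicate keys, so every dict A accepts is admitted.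
def Pre_build (adj : List (String × List String)) (artigos : List (String × List String)) : Prop :=
  (adj.map Prod.fst).Nodup ∧ (artigos.map Prod.fst).Nodup
instance (adj : List (String × List String)) (artigos : List (String × List String)) : Decidable (Pre_build adj artigos) := by unfold Pre_build; infer_instance

def pvWitness_build : (List (String × List String)) × (List (String × List String)) :=
  ([("a", []), ("b", ["c"])], [("t1", ["a", "b"]), ("t2", ["b"])])

def Spec_build (adj : List (String × List String)) (artigos : List (String × List String)) (out : List (String × List String)) : Prop := out = build_alt adj artigos
instance (adj : List (String × List String)) (artigos : List (String × List String)) (out : List (String × List String)) : Decidable (Spec_build adj artigos out) := by unfold Spec_build; infer_instance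

-- ===== CLAIM (what is proved, stated in full; the proofs are below) =====
def Claim_equal_build : Prop := ∀ (adj : List (String × List String)) (artigos : List (String × List String)), Dom_build adj artigos → Pre_build adj artigos → Spec_build adj artigos (build adj artigos)

-- ===== LEMMAS AND PROOFS =====
-- Both ports are folds of in-place updates of single entries. The proof flattens each into one
-- list of elementary operations (key, added author), applied left to right (applyOps); under
-- unique adj keys the result is a per-entry map, and for every key of adj the two programs
-- generate exactly the same operation sequence for that key.
def applyOps (ops : List (String × String)) (g : List (String × List String)) : List (String × List String) :=
  ops.foldl (fun g t => modifyFirst g t.1 (fun s => PySem.Set.add s t.2)) g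

def opsA (adj : List (String × List String)) (artigos : List (String × List String)) : List (String × String) :=
  (adj.map Prod.fst).flatMap (fun a =>
    (artigos.map Prod.snd).flatMap (fun auths =>
      (auths.filter (fun auth => a ∈ auths ∧ a ≠ auth)).map (fun auth => (a, auth))))

def opsB (adj : List (String × List String)) (artigos : List (String × List String)) : List (String × String) :=
  (artigos.map Prod.snd).flatMap (fun auths =>
    ((PySem.List.dedup auths).filter (fun a => containsKey adj a)).flatMap (fun a =>
      (auths.filter (fun auth => auth ≠ a)).map (fun auth => (a, auth))))

lemma keys_modifyFirst (g : List (String × List String)) (a : String) (f : List String → List String) :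
    (modifyFirst g a f).map Prod.fst = g.map Prod.fst := by
  induction g with
  | nil => rfl
  | cons p rest ih =>
    obtain ⟨k, s⟩ := p
    simp only [modifyFirst]
    split <;> simp [ih]


lemma modifyFirst_eq_map (g : List (String × List String)) (a : String) (f : List String → List String)
    (hnd : (g.map Prod.fst).Nodup) :
    modifyFirst g a f = g.map (fun p => if p.1 = a then (p.1, f p.2) else p) := by
  induction g with
  | nil => rfl
  | cons p rest ih =>
    obtain ⟨k, s⟩ := p
    simp only [List.map_cons, List.nodup_cons] at hnd
    simp only [modifyFirst, List.map_cons]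
    by_cases hk : k = a
    · subst hk
      have : ∀ p ∈ rest, (if p.1 = k then (p.1, f p.2) else p) = p := by
        intro p hp
        have hne : p.1 ≠ k := by
          intro e; exact hnd.1 (e ▸ List.mem_map_of_mem hp)
        simp [hne]
      rw [List.map_congr_left this]
      simp
    · simp only [if_neg hk, ih hnd.2]

lemma modifyFirst_id (g : List (String × List String)) (a : String) :
    modifyFirst g a (fun s => s) = g := by
  induction g with
  | nil => rfl
  | cons p rest ih =>
    obtain ⟨k, s⟩ := p
    simp only [modifyFirst]
    split <;> simp [ih]

lemma applyOps_eq_map (ops : List (String × String)) (g : List (String × List String))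
    (hnd : (g.map Prod.fst).Nodup) :
    applyOps ops g = g.map (fun p =>
      (p.1, (ops.filter (fun t => t.1 = p.1)).foldl (fun s t => PySem.Set.add s t.2) p.2)) := by
  induction ops generalizing g with
  | nil => simp [applyOps]
  | cons t ops ih =>
    obtain ⟨a, x⟩ := t
    simp only [applyOps, List.foldl_cons] at ih ⊢
    have hnd' : ((modifyFirst g a fun s => PySem.Set.add s x).map Prod.fst).Nodup := by
      rw [keys_modifyFirst]; exact hnd
    rw [ih _ hnd', modifyFirst_eq_map _ _ _ hnd, List.map_map]
    apply List.map_congr_left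
    intro p hp
    by_cases h : p.1 = a
    · simp [h, Function.comp]
    · simp [h, Function.comp, Ne.symm h]

lemma modifyFirst_modifyFirst (g : List (String × List String)) (a : String)
    (f f' : List String → List String) :
    modifyFirst (modifyFirst g a f) a f' = modifyFirst g a (fun s => f' (f s)) := by
  induction g with
  | nil => rfl
  | cons p rest ih =>
    obtain ⟨k, s⟩ := p
    by_cases h : k = a
    · simp [modifyFirst, h]
    · simp [modifyFirst, h, ih]

lemma applyOps_map_single (a : String) (l : List String) (g : List (String × List String)) :
    applyOps (l.map (fun x => (a, x))) g
      = modifyFirst g a (fun s => l.foldl (fun s' x => PySem.Set.add s' x) s) := by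
  induction l generalizing g with
  | nil =>
    simp only [List.map_nil, applyOps, List.foldl_nil, List.foldl_nil]
    exact (modifyFirst_id g a).symm
  | cons x l ih =>
    simp only [List.map_cons, applyOps, List.foldl_cons] at ih ⊢
    rw [ih, modifyFirst_modifyFirst]

lemma containsKey_eq (g : List (String × List String)) (a : String) :
    containsKey g a = (g.map Prod.fst).contains a := by
  induction g with
  | nil => rfl
  | cons p rest ih =>
    simp only [containsKey, List.any_cons, List.map_cons, List.contains_cons] at *
    by_cases h : p.1 = a <;> simp [h, ih, eq_comm]
    · rw [beq_eq_false_iff_ne.mpr h, beq_eq_false_iff_ne.mpr (Ne.symm h)]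

lemma flatMap_if_single {β : Type} (l : List String) (k : String) (h : String → List β)
    (hnd : l.Nodup) :
    l.flatMap (fun a => if a = k then h a else []) = if k ∈ l then h k else [] := by
  induction l with
  | nil => simp
  | cons a l ih =>
    simp only [List.nodup_cons] at hnd
    simp only [List.flatMap_cons, List.mem_cons]
    by_cases h1 : a = k
    · subst h1
      have hz : l.flatMap (fun b => if b = a then h b else []) = [] := by
        apply List.flatMap_eq_nil_iff.mpr
        intro x hx
        have : x ≠ a := fun e => hnd.1 (e ▸ hx)
        simp [this]
      simp [hz]
    · rw [if_neg h1, ih hnd.2]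
      by_cases h2 : k ∈ l <;> simp [h2, Ne.symm h1]

lemma build_eq_applyOps (adj artigos : List (String × List String)) :
    build adj artigos = applyOps (opsA adj artigos) adj := by
  unfold build applyOps opsA
  rw [List.foldl_flatMap]
  congr 1
  funext g a
  rw [List.foldl_flatMap]
  congr 1
  funext g2 auths
  rw [List.foldl_map, List.foldl_filter]
  simp

lemma keys_applyOps (ops : List (String × String)) (g : List (String × List String)) :
    (applyOps ops g).map Prod.fst = g.map Prod.fst := by
  induction ops generalizing g with
  | nil => rfl
  | cons t ops ih =>
    simp only [applyOps, List.foldl_cons] at ih ⊢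
    rw [ih, keys_modifyFirst]

lemma condFold (l : List String) (F : String → List String → List String)
    (g K : List (String × List String)) (hk : g.map Prod.fst = K.map Prod.fst) :
    l.foldl (fun g a => if containsKey g a then modifyFirst g a (F a) else g) g
      = l.foldl (fun g a => if containsKey K a then modifyFirst g a (F a) else g) g := by
  induction l generalizing g with
  | nil => rfl
  | cons a l ih =>
    simp only [List.foldl_cons]
    have hca : containsKey g a = containsKey K a := by
      rw [containsKey_eq, containsKey_eq, hk]
    rw [hca]
    by_cases h : containsKey K a = true
    · simp only [if_pos h]
      exact ih _ (by rw [keys_modifyFirst]; exact hk)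
    · simp only [if_neg h]
      exact ih _ hk

lemma altArticle (auths : List String) (g K : List (String × List String))
    (hk : g.map Prod.fst = K.map Prod.fst) :
    (PySem.List.dedup auths).foldl (fun g a =>
      if containsKey g a then
        modifyFirst g a (fun s =>
          auths.foldl (fun s' auth => if auth ≠ a then PySem.Set.add s' auth else s') s)
      else g) g
    = applyOps (((PySem.List.dedup auths).filter (fun a => containsKey K a)).flatMap (fun a =>
        (auths.filter (fun auth => auth ≠ a)).map (fun auth => (a, auth)))) g := by
  rw [condFold _ _ _ _ hk]
  rw [applyOps, List.foldl_flatMap, ← List.foldl_filter]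
  congr 1
  funext g a
  have hs := applyOps_map_single a (auths.filter (fun auth => auth ≠ a)) g
  simp only [applyOps] at hs
  rw [hs]
  congr 1
  funext s
  rw [List.foldl_filter]
  simp

lemma applyOps_append (l1 l2 : List (String × String)) (g : List (String × List String)) :
    applyOps (l1 ++ l2) g = applyOps l2 (applyOps l1 g) := by
  simp [applyOps, List.foldl_append]

lemma altFold (vals : List (List String)) (g K : List (String × List String))
    (hk : g.map Prod.fst = K.map Prod.fst) :
    vals.foldl (fun grafo auths =>
      (PySem.List.dedup auths).foldl (fun g a =>
        if containsKey g a then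
          modifyFirst g a (fun s =>
            auths.foldl (fun s' auth => if auth ≠ a then PySem.Set.add s' auth else s') s)
        else g) grafo) g
    = applyOps (vals.flatMap (fun auths =>
        ((PySem.List.dedup auths).filter (fun a => containsKey K a)).flatMap (fun a =>
          (auths.filter (fun auth => auth ≠ a)).map (fun auth => (a, auth))))) g := by
  induction vals generalizing g with
  | nil => rfl
  | cons auths vals ih =>
    simp only [List.foldl_cons, List.flatMap_cons]
    rw [applyOps_append, altArticle auths g K hk]
    exact ih _ (by rw [keys_applyOps]; exact hk)

lemma build_alt_eq_applyOps (adj artigos : List (String × List String)) :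
    build_alt adj artigos = applyOps (opsB adj artigos) adj := by
  unfold build_alt opsB
  exact altFold (artigos.map Prod.snd) adj adj rfl

lemma filter_opsA (adj artigos : List (String × List String)) (k : String)
    (hnd : (adj.map Prod.fst).Nodup) (hk : k ∈ adj.map Prod.fst) :
    (opsA adj artigos).filter (fun t => t.1 = k)
    = (artigos.map Prod.snd).flatMap (fun auths =>
        if k ∈ auths then (auths.filter (fun auth => auth ≠ k)).map (fun auth => (k, auth)) else []) := by
  unfold opsA
  rw [List.filter_flatMap]
  have h1 : ∀ a : String,
      ((artigos.map Prod.snd).flatMap (fun auths =>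
        (auths.filter (fun auth => a ∈ auths ∧ a ≠ auth)).map (fun auth => (a, auth)))).filter (fun t => t.1 = k)
      = if a = k then
          (artigos.map Prod.snd).flatMap (fun auths =>
            (auths.filter (fun auth => a ∈ auths ∧ a ≠ auth)).map (fun auth => (a, auth)))
        else [] := by
    intro a
    by_cases h : a = k
    · rw [if_pos h]
      apply List.filter_eq_self.mpr
      intro t ht
      simp only [List.mem_flatMap, List.mem_map] at ht
      obtain ⟨auths, _, auth, _, rfl⟩ := ht
      simp [h]
    · rw [if_neg h]
      apply List.filter_eq_nil_iff.mpr
      intro t ht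
      simp only [List.mem_flatMap, List.mem_map] at ht
      obtain ⟨auths, _, auth, _, rfl⟩ := ht
      simp [h]
  simp only [h1]
  rw [flatMap_if_single _ _ _ hnd, if_pos hk]
  have h2 : ∀ auths : List String,
      (auths.filter (fun auth => k ∈ auths ∧ k ≠ auth)).map (fun auth => (k, auth))
      = if k ∈ auths then (auths.filter (fun auth => auth ≠ k)).map (fun auth => (k, auth)) else [] := by
    intro auths
    by_cases hm : k ∈ auths
    · rw [if_pos hm]
      congr 1
      apply List.filter_congr
      intro auth _
      simp [hm, ne_comm]
    · rw [if_neg hm]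
      have : auths.filter (fun auth => decide (k ∈ auths ∧ k ≠ auth)) = [] := by
        apply List.filter_eq_nil_iff.mpr
        intro auth _
        simp [hm]
      rw [this, List.map_nil]
  simp only [h2]

lemma filter_opsB (adj artigos : List (String × List String)) (k : String)
    (hk : k ∈ adj.map Prod.fst) :
    (opsB adj artigos).filter (fun t => t.1 = k)
    = (artigos.map Prod.snd).flatMap (fun auths =>
        if k ∈ auths then (auths.filter (fun auth => auth ≠ k)).map (fun auth => (k, auth)) else []) := by
  unfold opsB
  rw [List.filter_flatMap]
  have hck : containsKey adj k = true := by
    rw [containsKey_eq]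
    exact List.contains_iff_mem.mpr hk
  have h1 : ∀ auths : List String,
      (((PySem.List.dedup auths).filter (fun a => containsKey adj a)).flatMap (fun a =>
        (auths.filter (fun auth => auth ≠ a)).map (fun auth => (a, auth)))).filter (fun t => t.1 = k)
      = if k ∈ auths then (auths.filter (fun auth => auth ≠ k)).map (fun auth => (k, auth)) else [] := by
    intro auths
    rw [List.filter_flatMap]
    have h2 : ∀ a : String,
        ((auths.filter (fun auth => auth ≠ a)).map (fun auth => (a, auth))).filter (fun t => t.1 = k)
        = if a = k then (auths.filter (fun auth => auth ≠ a)).map (fun auth => (a, auth)) else [] := by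
      intro a
      by_cases h : a = k
      · rw [if_pos h]
        apply List.filter_eq_self.mpr
        intro t ht
        simp only [List.mem_map] at ht
        obtain ⟨auth, _, rfl⟩ := ht
        simp [h]
      · rw [if_neg h]
        apply List.filter_eq_nil_iff.mpr
        intro t ht
        simp only [List.mem_map] at ht
        obtain ⟨auth, _, rfl⟩ := ht
        simp [h]
    simp only [h2]
    rw [flatMap_if_single _ _ _ ((PySem.List.nodup_dedup auths).filter _)]
    by_cases hm : k ∈ auths
    · rw [if_pos hm, if_pos]
      rw [List.mem_filter]
      exact ⟨(PySem.List.mem_dedup auths k).mpr hm, hck⟩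
    · rw [if_neg hm, if_neg]
      rw [List.mem_filter]
      intro ⟨h3, _⟩
      exact hm ((PySem.List.mem_dedup auths k).mp h3)
  simp only [h1]

-- ===== VERDICT (by name: the statement is the Claim_ definition above) =====
theorem build_spec : Claim_equal_build := by
  intro adj artigos _ hpre
  unfold Spec_build
  rw [build_eq_applyOps, build_alt_eq_applyOps,
      applyOps_eq_map _ _ hpre.1, applyOps_eq_map _ _ hpre.1]
  apply List.map_congr_left
  intro p hp
  have hk : p.1 ∈ adj.map Prod.fst := List.mem_map_of_mem hp
  rw [filter_opsA adj artigos p.1 hpre.1 hk, filter_opsB adj artigos p.1 hk]
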